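-- pv_equiv track=rewrite | github.com/Hasantha-Ekanayake/Network_Security_Project | analyzer/dataset_json.py | create_segments_from_normalized_flow
-- ===== SOURCE A (Python) =====
-- def create_segments_from_normalized_flow(norm_flow, min_window_size, max_window_size):
--     clumps = list(norm_flow)
--     original_len = len(clumps)
--
--     # Pad enough so the smallest window can slide to the end,
--     # while each stored segment still has max_window_size length.
--     padded_len = max(
--         original_len + max_window_size - min_window_size,
--         max_window_size,
--     )
--
--     while len(clumps) < padded_len:
--         clumps.append([-1, -1, -1, -1, 0])
--
--     num_starts = max(1, original_len - min_window_size + 1)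
--
--     segments = []
--     for start in range(num_starts):
--         segments.append(clumps[start:start + max_window_size])
--
--     return segments
-- ===== SOURCE B (Python) =====
-- def create_segments_from_normalized_flow(norm_flow, min_window_size, max_window_size):
--     flow = list(norm_flow)
--     n = len(flow)
--     num_starts = max(1, n - min_window_size + 1)
--     segments = [[] for _ in range(num_starts)]
--     # One pass over the (virtually padded) rows: row j belongs to every
--     # window whose start s satisfies s <= j < s + max_window_size.
--     for j in range(num_starts - 1 + max_window_size):
--         row = flow[j] if j < n else [-1, -1, -1, -1, 0]
--         for s in range(max(0, j - max_window_size + 1), min(num_starts, j + 1)):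
--             segments[s].append(row)
--     return segments
-- ===== Notes on version B (the rewrite author's own statement) =====
-- stated objective: alternative
-- what changed: B inverts the traversal: instead of padding the whole flow and slicing one window per start, it makes a single row-major pass over the (virtually padded) row indices and distributes each row into every window that contains it, with no padded list, no while-loop and no slicing.
-- outside the precondition, e.g. on create_segments_from_normalized_flow([[], [0]], -1, -1): A returns [[[]], [], [], []], B returns [[], [], [], []]
import Mathlib
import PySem

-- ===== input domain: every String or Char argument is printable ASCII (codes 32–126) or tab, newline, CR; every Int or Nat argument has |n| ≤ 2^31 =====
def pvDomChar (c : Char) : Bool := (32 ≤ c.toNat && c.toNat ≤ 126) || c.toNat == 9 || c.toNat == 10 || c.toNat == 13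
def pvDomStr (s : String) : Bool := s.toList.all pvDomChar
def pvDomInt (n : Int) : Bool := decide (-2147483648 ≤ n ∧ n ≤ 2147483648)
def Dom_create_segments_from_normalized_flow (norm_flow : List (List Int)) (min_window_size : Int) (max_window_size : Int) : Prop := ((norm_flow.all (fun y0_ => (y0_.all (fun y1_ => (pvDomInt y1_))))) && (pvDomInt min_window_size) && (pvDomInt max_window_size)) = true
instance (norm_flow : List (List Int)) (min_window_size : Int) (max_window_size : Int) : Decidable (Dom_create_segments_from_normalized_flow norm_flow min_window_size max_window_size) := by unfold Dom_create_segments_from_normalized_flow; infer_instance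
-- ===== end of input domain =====

-- B inverts the traversal: a single row-major pass distributes each (virtually padded) row into every
-- window containing it — no padded list, no while-loop, no slicing; objective: alternative.

-- ===== PORT A =====
-- the 'while len(clumps) < padded_len: clumps.append([-1,-1,-1,-1,0])' loop
def pvPadLoop (clumps : List (List Int)) (padded_len : Int) : List (List Int) :=
  if (clumps.length : Int) < padded_len then
    pvPadLoop (clumps ++ [[-1, -1, -1, -1, 0]]) padded_len
  else clumps
termination_by (padded_len - clumps.length).toNat
decreasing_by simp only [List.length_append, List.length_cons, List.length_nil]; omega

def create_segments_from_normalized_flow (norm_flow : List (List Int)) (min_window_size : Int) (max_window_size : Int) : List (List (List Int)) :=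
  let clumps := norm_flow
  let original_len : Int := clumps.length
  let padded_len : Int := max (original_len + max_window_size - min_window_size) max_window_size
  let clumps := pvPadLoop clumps padded_len
  let num_starts : Int := max 1 (original_len - min_window_size + 1)
  (PySem.List.pyRange 0 num_starts 1).foldl
    (fun segments start =>
      segments ++ [PySem.List.slice clumps (some start) (some (start + max_window_size))]) []

-- ===== PORT B =====
def create_segments_from_normalized_flow_alt (norm_flow : List (List Int)) (min_window_size : Int) (max_window_size : Int) : List (List (List Int)) :=
  let flow := norm_flow
  let n : Int := flow.length
  let num_starts : Int := max 1 (n - min_window_size + 1)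
  -- segments = [[] for _ in range(num_starts)]
  let init : List (List (List Int)) := List.replicate num_starts.toNat []
  (PySem.List.pyRange 0 (num_starts - 1 + max_window_size) 1).foldl
    (fun segments j =>
      let row := if j < n then PySem.List.pyGetD flow j [] else [-1, -1, -1, -1, 0]
      (PySem.List.pyRange (max 0 (j - max_window_size + 1)) (min num_starts (j + 1)) 1).foldl
        (fun segs s => segs.set s.toNat (segs.getD s.toNat [] ++ [row])) segments)
    init

-- ===== PRECONDITION & SPEC =====
-- Pre_ excludes only negative max_window_size, a nonsensical window size no caller would specify: there
-- A returns whatever Python's negative-end slice clamping yields (content depending on the distance from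
-- the end of the padded list) while B naturally returns empty windows — both values are accidental on
-- that corner; every input with max_window_size ≥ 0 is covered.
def Pre_create_segments_from_normalized_flow (norm_flow : List (List Int)) (min_window_size : Int) (max_window_size : Int) : Prop :=
  0 ≤ max_window_size

instance (norm_flow : List (List Int)) (min_window_size : Int) (max_window_size : Int) : Decidable (Pre_create_segments_from_normalized_flow norm_flow min_window_size max_window_size) := by unfold Pre_create_segments_from_normalized_flow; infer_instance

def pvWitness_create_segments_from_normalized_flow : List (List Int) × Int × Int := ([[1, 2, 3, 4, 0], [5, 6, 7, 8, 1]], 1, 3)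

def Spec_create_segments_from_normalized_flow (norm_flow : List (List Int)) (min_window_size : Int) (max_window_size : Int) (out : List (List (List Int))) : Prop := out = create_segments_from_normalized_flow_alt norm_flow min_window_size max_window_size
instance (norm_flow : List (List Int)) (min_window_size : Int) (max_window_size : Int) (out : List (List (List Int))) : Decidable (Spec_create_segments_from_normalized_flow norm_flow min_window_size max_window_size out) := by unfold Spec_create_segments_from_normalized_flow; infer_instance

-- ===== CLAIM (what is proved, stated in full; the proofs are below) =====
def Claim_equal_create_segments_from_normalized_flow : Prop := ∀ (norm_flow : List (List Int)) (min_window_size : Int) (max_window_size : Int), Dom_create_segments_from_normalized_flow norm_flow min_window_size max_window_size → Pre_create_segments_from_normalized_flow norm_flow min_window_size max_window_size → Spec_create_segments_from_normalized_flow norm_flow min_window_size max_window_size (create_segments_from_normalized_flow norm_flow min_window_size max_window_size)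

-- ===== LEMMAS AND PROOFS =====

-- row j of the virtually padded flow
def pvRow (f : List (List Int)) (j : Nat) : List Int :=
  if j < f.length then f.getD j [] else [-1, -1, -1, -1, 0]

-- the common closed form both ports are reduced to (W = max_window_size.toNat)
def pvClosed (f : List (List Int)) (NS W : Nat) : List (List (List Int)) :=
  (List.range NS).map (fun s => (List.range' s W).map (pvRow f))

-- the padding while-loop appends exactly (padded_len - len).toNat pad rows
theorem pvPadLoop_eq (xs : List (List Int)) (p : Int) :
    pvPadLoop xs p = xs ++ List.replicate (p - xs.length).toNat [-1, -1, -1, -1, 0] := by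
  fun_induction pvPadLoop xs p with
  | case1 xs hlt ih =>
    rw [ih, List.append_assoc]
    congr 1
    have hk : (p - (xs.length : Int)).toNat
        = (p - ((xs ++ [[-1, -1, -1, -1, 0]]).length : Int)).toNat + 1 := by
      simp only [List.length_append, List.length_cons, List.length_nil]
      omega
    rw [hk, List.replicate_succ]
    rfl
  | case2 xs hge =>
    have : (p - (xs.length : Int)).toNat = 0 := by omega
    simp [this]

-- a full-length window of the padded list is the pointwise row map
theorem pvSlicePad (f : List (List Int)) (K s W : Nat) (h : s + W ≤ f.length + K) :
    (((f ++ List.replicate K ([-1, -1, -1, -1, 0] : List Int)).drop s).take W)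
      = (List.range' s W).map (pvRow f) := by
  apply List.ext_getElem
  · simp only [List.length_take, List.length_drop, List.length_append,
      List.length_replicate, List.length_map, List.length_range']
    omega
  · intro i h1 h2
    simp only [List.length_take, List.length_drop, List.length_append,
      List.length_replicate] at h1
    simp only [List.getElem_take, List.getElem_drop, List.getElem_map, List.getElem_range']
    rcases Nat.lt_or_ge (s + i) f.length with hlt | hge
    · rw [List.getElem_append_left hlt]
      simp [pvRow, hlt]
    · rw [List.getElem_append_right hge]
      simp [pvRow, Nat.not_lt.mpr hge, List.getElem_replicate]

-- A's result is the closed form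
theorem pvA_eq (f : List (List Int)) (mi ma : Int) (h : 0 ≤ ma) :
    create_segments_from_normalized_flow f mi ma
      = pvClosed f (max 1 ((f.length : Int) - mi + 1)).toNat ma.toNat := by
  unfold create_segments_from_normalized_flow pvClosed
  simp only [pvPadLoop_eq, PySem.List.foldl_append_singleton_eq_map, List.nil_append,
    PySem.List.pyRange_one, Int.sub_zero, List.map_map]
  apply List.map_congr_left
  intro k hk
  rw [List.mem_range] at hk
  simp only [Function.comp_apply, Int.zero_add]
  have hma : ((ma.toNat : Nat) : Int) = ma := Int.toNat_of_nonneg h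
  rw [← hma, PySem.List.slice_natCast_add]
  apply pvSlicePad
  -- s + W ≤ length of the padded list
  omega

-- one inner pass (append row x to segments a..b-1), described pointwise
theorem pvInner_get? (x : List Int) (b : Int) :
    ∀ (k : Nat) (a : Int) (L : List (List (List Int))), (b - a).toNat = k → 0 ≤ a → ∀ (i : Nat),
      ((PySem.List.pyRange a b 1).foldl
          (fun segs s => segs.set s.toNat (segs.getD s.toNat [] ++ [x])) L)[i]?
        = if a ≤ (i : Int) ∧ (i : Int) < b then (L[i]?).map (· ++ [x]) else L[i]? := by
  intro k
  induction k with
  | zero =>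
    intro a L hk ha i
    rw [PySem.List.pyRange_one_eq_nil (by omega)]
    simp only [List.foldl_nil]
    rw [if_neg (by omega)]
  | succ k ih =>
    intro a L hk ha i
    have hab : a < b := by omega
    rw [PySem.List.pyRange_one_cons hab]
    simp only [List.foldl_cons]
    rw [ih (a + 1) _ (by omega) (by omega) i]
    rcases eq_or_ne a.toNat i with hia | hia
    · rw [if_neg (by omega), if_pos (by constructor <;> omega)]
      rw [hia]
      rcases Nat.lt_or_ge i L.length with hlen | hlen
      · rw [List.getElem?_set_eq_of_lt _ hlen, List.getElem?_eq_getElem hlen,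
          List.getD_eq_getElem?_getD, List.getElem?_eq_getElem hlen]
        simp
      · rw [List.getElem?_set, if_pos rfl, if_neg (by omega), List.getElem?_eq_none (by omega)]
        simp
    · rw [List.getElem?_set_ne hia]
      by_cases hc : a ≤ (i : Int) ∧ (i : Int) < b
      · rw [if_pos (by omega), if_pos hc]
      · rw [if_neg (by omega), if_neg hc]

-- B's fold up to outer bound m equals the truncated closed form
theorem pvB_inv (f : List (List Int)) (mi ma : Int) (h : 0 ≤ ma) (m : Nat) :
    (PySem.List.pyRange 0 (m : Int) 1).foldl
        (fun segments j =>
          (PySem.List.pyRange (max 0 (j - ma + 1)) (min (max 1 ((f.length : Int) - mi + 1)) (j + 1)) 1).foldl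
            (fun segs s => segs.set s.toNat (segs.getD s.toNat [] ++
              [if j < (f.length : Int) then PySem.List.pyGetD f j [] else [-1, -1, -1, -1, 0]]))
            segments)
        (List.replicate (max 1 ((f.length : Int) - mi + 1)).toNat [])
      = (List.range (max 1 ((f.length : Int) - mi + 1)).toNat).map
          (fun s => (List.range' s (min m (s + ma.toNat) - s)).map (pvRow f)) := by
  induction m with
  | zero =>
    rw [PySem.List.pyRange_one_eq_nil (by omega)]
    simp only [List.foldl_nil]
    apply List.ext_getElem
    · simp
    · intro i h1 h2
      simp only [List.getElem_replicate, List.getElem_map, List.getElem_range]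
      have h0 : min 0 (i + ma.toNat) - i = 0 := by omega
      rw [h0]
      simp
  | succ m ih =>
    have hcast : ((m + 1 : Nat) : Int) = (m : Int) + 1 := by push_cast; ring
    rw [hcast, PySem.List.pyRange_one_succ_right (by omega), List.foldl_append,
      List.foldl_cons, List.foldl_nil, ih]
    -- the row appended at outer index m is pvRow f m
    have hrow : (if (m : Int) < (f.length : Int) then PySem.List.pyGetD f (m : Int) []
        else [-1, -1, -1, -1, 0]) = pvRow f m := by
      unfold pvRow
      rcases Nat.lt_or_ge m f.length with hm | hm
      · rw [if_pos (by exact_mod_cast hm), if_pos hm, PySem.List.pyGetD_natCast]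
      · rw [if_neg (by omega), if_neg (by omega)]
    rw [hrow]
    apply List.ext_getElem?
    intro i
    rw [pvInner_get? (pvRow f m) _ _ _ _ rfl (by omega) i]
    rcases Nat.lt_or_ge i (max 1 ((f.length : Int) - mi + 1)).toNat with hi | hi
    · simp only [List.getElem?_map, List.getElem?_range hi, Option.map_some]
      by_cases hc : max 0 ((m : Int) - ma + 1) ≤ (i : Int) ∧
          (i : Int) < min (max 1 ((f.length : Int) - mi + 1)) ((m : Int) + 1)
      · rw [if_pos hc]
        have h1 : min m (i + ma.toNat) = m := by omega
        have h2 : min (m + 1) (i + ma.toNat) = m + 1 := by omega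
        have h3 : i ≤ m := by omega
        rw [h1, h2]
        have h4 : m + 1 - i = (m - i) + 1 := by omega
        rw [h4, List.range'_concat]
        have h5 : i + 1 * (m - i) = m := by omega
        rw [h5, List.map_append, List.map_cons, List.map_nil]
      · rw [if_neg hc]
        have : min (m + 1) (i + ma.toNat) - i = min m (i + ma.toNat) - i := by omega
        rw [this]
    · rw [List.getElem?_eq_none (by simpa using hi), List.getElem?_eq_none (by simpa using hi)]
      simp

-- B's result is the closed form
theorem pvB_eq (f : List (List Int)) (mi ma : Int) (h : 0 ≤ ma) :
    create_segments_from_normalized_flow_alt f mi ma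
      = pvClosed f (max 1 ((f.length : Int) - mi + 1)).toNat ma.toNat := by
  unfold create_segments_from_normalized_flow_alt pvClosed
  dsimp only
  have hM : (max 1 ((f.length : Int) - mi + 1)) - 1 + ma
      = (((max 1 ((f.length : Int) - mi + 1)).toNat - 1 + ma.toNat : Nat) : Int) := by
    push_cast; omega
  rw [hM, pvB_inv f mi ma h]
  apply List.map_congr_left
  intro s hs
  rw [List.mem_range] at hs
  have : min ((max 1 ((f.length : Int) - mi + 1)).toNat - 1 + ma.toNat) (s + ma.toNat)
      = s + ma.toNat := by omega
  rw [this, Nat.add_sub_cancel_left]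

-- ===== VERDICT (by name: the statement is the Claim_ definition above) =====
theorem create_segments_from_normalized_flow_spec : Claim_equal_create_segments_from_normalized_flow := by
  intro nf mi ma _dom hpre
  unfold Spec_create_segments_from_normalized_flow
  rw [pvA_eq nf mi ma hpre, pvB_eq nf mi ma hpre]
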